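-- pv_equiv track=rewrite | github.com/animefn/ksplitter | ksplitter.py | k_array_char
-- ===== SOURCE A (Python) =====
-- def k_array_char(karaText):
--     karaSplit_array = []
--     for letter in karaText:
--         if letter in [" ","!","?",",",";",":"]:
--             if len(karaSplit_array)>0:
--                 karaSplit_array [ len(karaSplit_array)-1 ] =  karaSplit_array [ len(karaSplit_array)-1 ]+letter
--             else:
--                 karaSplit_array.append (letter)
--         else:
--             karaSplit_array.append (letter)
--
--     return karaSplit_array
-- ===== SOURCE B (Python) =====
-- def k_array_char(karaText):
--     # Tokenizer: each token is one character plus its greedy run of trailing punctuation.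
--     PUNCT = " !?,;:"
--     out = []
--     i, n = 0, len(karaText)
--     while i < n:
--         j = i + 1
--         while j < n and karaText[j] in PUNCT:
--             j += 1
--         out.append(karaText[i:j])
--         i = j
--     return out
-- ===== Notes on version B (the rewrite author's own statement) =====
-- stated objective: alternative
-- what changed: Replaced A's accumulator loop that mutates its last element for each punctuation character with a two-pointer tokenizer that emits each token (one char plus its greedy trailing punctuation run) as a single slice.
import Mathlib
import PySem

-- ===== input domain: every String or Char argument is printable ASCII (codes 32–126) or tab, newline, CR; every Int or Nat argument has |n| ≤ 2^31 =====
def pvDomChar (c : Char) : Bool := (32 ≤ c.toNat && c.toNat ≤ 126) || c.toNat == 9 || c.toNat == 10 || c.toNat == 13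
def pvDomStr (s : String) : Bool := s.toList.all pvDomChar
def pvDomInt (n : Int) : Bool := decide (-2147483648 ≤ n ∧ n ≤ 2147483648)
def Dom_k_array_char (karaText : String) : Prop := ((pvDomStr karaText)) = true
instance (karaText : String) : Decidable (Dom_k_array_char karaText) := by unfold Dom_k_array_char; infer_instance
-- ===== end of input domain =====

-- B is an alternative tokenizer (char + greedy trailing punctuation run) replacing A's last-element-mutating accumulator loop.

def pvPunct (c : Char) : Bool := c == ' ' || c == '!' || c == '?' || c == ',' || c == ';' || c == ':'

-- ===== PORT A =====
-- A's loop over the string, appending a new element or concatenating onto the last one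
-- (strings represented as List Char during the fold, turned into String at the end).
def kStep (acc : List (List Char)) (c : Char) : List (List Char) :=
  if pvPunct c then
    if acc.length > 0 then acc.dropLast ++ [acc.getLastD [] ++ [c]]
    else acc ++ [[c]]
  else acc ++ [[c]]

def k_array_char (karaText : String) : List String :=
  (karaText.toList.foldl kStep []).map (fun l => String.mk l)

-- ===== PORT B =====
-- B's two-pointer tokenizer: take one char, then the greedy run of trailing punctuation.
def bTok : List Char → List (List Char)
  | [] => []
  | c :: rest => (c :: rest.takeWhile pvPunct) :: bTok (rest.dropWhile pvPunct)
termination_by l => l.length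
decreasing_by
  exact Nat.lt_succ_of_le (List.length_dropWhile_le pvPunct rest)

def k_array_char_alt (karaText : String) : List String :=
  (bTok karaText.toList).map (fun l => String.mk l)

-- ===== PRECONDITION & SPEC =====
def Spec_k_array_char (karaText : String) (out : List String) : Prop := out = k_array_char_alt karaText
instance (karaText : String) (out : List String) : Decidable (Spec_k_array_char karaText out) := by unfold Spec_k_array_char; infer_instance

-- ===== CLAIM (what is proved, stated in full; the proofs are below) =====
def Claim_equal_k_array_char : Prop := ∀ (karaText : String), Dom_k_array_char karaText → Spec_k_array_char karaText (k_array_char karaText)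

-- ===== LEMMAS AND PROOFS =====

theorem bTok_nil : bTok [] = [] := by simp [bTok]

theorem bTok_cons (c : Char) (rest : List Char) :
    bTok (c :: rest) = (c :: rest.takeWhile pvPunct) :: bTok (rest.dropWhile pvPunct) := by
  rw [bTok]


theorem kStep_ne_nil (acc : List (List Char)) (c : Char) : kStep acc c ≠ [] := by
  unfold kStep
  split_ifs <;> simp

theorem kStep_prefix (pre acc : List (List Char)) (c : Char) (h : acc ≠ []) :
    kStep (pre ++ acc) c = pre ++ kStep acc c := by
  have hl : 0 < acc.length := List.length_pos_iff.mpr h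
  have hl2 : 0 < (pre ++ acc).length := by simp; omega
  unfold kStep
  by_cases hp : pvPunct c = true
  · simp only [hp, if_true, hl, hl2, if_pos]
    rw [List.dropLast_append_of_ne_nil h, List.getLastD_eq_getLast?,
      List.getLastD_eq_getLast?, List.getLast?_append_of_ne_nil _ h]
    simp
  · simp [hp]

theorem foldl_prefix (cs : List Char) (pre acc : List (List Char)) (h : acc ≠ []) :
    cs.foldl kStep (pre ++ acc) = pre ++ cs.foldl kStep acc := by
  induction cs generalizing acc with
  | nil => simp
  | cons c cs ih =>
      simp only [List.foldl_cons, kStep_prefix pre acc c h]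
      exact ih _ (kStep_ne_nil acc c)

theorem foldl_single (cs : List Char) (t : List Char) :
    cs.foldl kStep [t] = (t ++ cs.takeWhile pvPunct) :: bTok (cs.dropWhile pvPunct) := by
  induction cs generalizing t with
  | nil => simp [bTok_nil]
  | cons c cs ih =>
      by_cases hp : pvPunct c = true
      · have hstep : kStep [t] c = [t ++ [c]] := by simp [kStep, hp]
        simp [List.foldl_cons, hstep, ih, hp]
      · have hstep : kStep [t] c = [t, [c]] := by simp [kStep, hp]
        have heq : ([t] ++ [[c]] : List (List Char)) = [t, [c]] := by simp
        rw [List.foldl_cons, hstep]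
        calc cs.foldl kStep [t, [c]] = [t] ++ cs.foldl kStep [[c]] := by
              rw [← heq]; exact foldl_prefix cs [t] [[c]] (by simp)
          _ = t :: ((c :: cs.takeWhile pvPunct) :: bTok (cs.dropWhile pvPunct)) := by
              rw [ih]; simp
          _ = _ := by rw [List.takeWhile_cons_of_neg (by simp [hp]), List.dropWhile_cons_of_neg (by simp [hp]), bTok_cons]; simp

theorem foldl_eq_bTok (cs : List Char) : cs.foldl kStep [] = bTok cs := by
  cases cs with
  | nil => simp [bTok_nil]
  | cons c cs =>
      have h0 : kStep [] c = [[c]] := by unfold kStep; split_ifs <;> simp_all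
      simp only [List.foldl_cons, h0, foldl_single]
      rw [bTok_cons]
      simp

-- ===== VERDICT (by name: the statement is the Claim_ definition above) =====
theorem k_array_char_spec : Claim_equal_k_array_char := by
  intro s _
  unfold Spec_k_array_char k_array_char k_array_char_alt
  rw [foldl_eq_bTok]
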